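-- pv_equiv track=rewrite | github.com/peachily/codyssey02-python | test/q5.py | caesar_cipher_decode
-- ===== SOURCE A (Python) =====
-- def caesar_cipher_decode(target_text: str) -> list[str]:
--
--     # === 입력 유효성 검증 ===
--     if not isinstance(target_text, str):
--         raise ValueError
--     if target_text == '':
--         raise ValueError
--
--     results: list[str] = []
--     for i in range(26):
--         decoded = []
--         for ch in target_text:
--             if 'a' <= ch <= 'z':
--                 code = ord(ch) - i
--                 if code < ord('a'):
--                     code += 26
--                 decoded.append(chr(code))
--             else:
--                 decoded.append(ch)
--         results.append(''.join(decoded))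
--     return results
-- ===== SOURCE B (Python) =====
-- def caesar_cipher_decode(target_text: str) -> list[str]:
--     if not isinstance(target_text, str):
--         raise ValueError
--     if target_text == '':
--         raise ValueError
--     # Incremental chaining: the shift-i decoding is the shift-(i-1) decoding
--     # moved back one more letter, so each result is derived from the previous
--     # result instead of re-deriving every shift from the original text.
--     def back1(s: str) -> str:
--         return ''.join('z' if c == 'a' else chr(ord(c) - 1) if 'a' <= c <= 'z' else c for c in s)
--     cur = target_text
--     results = [cur]
--     for _ in range(25):
--         cur = back1(cur)
--         results.append(cur)
--     return results
-- ===== Notes on version B (the rewrite author's own statement) =====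
-- stated objective: alternative
-- what changed: Replaces A's recomputation of every shift from the original text by incremental chaining: a single back-by-one decoder is applied 25 times, each output string derived from the previous result, so the mod-26 wrap arithmetic and the shift parameter disappear.
-- outside the precondition, e.g. on caesar_cipher_decode(''): A raises ValueError, B raises ValueError
import Mathlib
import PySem

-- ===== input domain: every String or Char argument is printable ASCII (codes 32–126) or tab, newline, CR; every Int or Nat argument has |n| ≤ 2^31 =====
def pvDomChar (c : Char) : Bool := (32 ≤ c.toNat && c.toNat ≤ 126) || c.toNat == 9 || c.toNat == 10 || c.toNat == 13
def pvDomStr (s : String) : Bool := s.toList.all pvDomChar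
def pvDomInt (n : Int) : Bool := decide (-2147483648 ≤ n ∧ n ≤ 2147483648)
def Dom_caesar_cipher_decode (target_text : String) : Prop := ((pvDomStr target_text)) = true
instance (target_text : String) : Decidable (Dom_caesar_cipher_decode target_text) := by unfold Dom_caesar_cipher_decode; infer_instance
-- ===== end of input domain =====

-- B replaces A's per-shift recomputation from the original text by incremental
-- chaining: one back-by-one decoder applied 25 times, each result derived from
-- the previous one (objective: alternative).

-- ===== PORT A =====
def caesar_cipher_decode (target_text : String) : List String :=
  (PySem.List.pyRange 0 26 1).foldl
    (fun results i =>
      let decoded :=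
        target_text.toList.foldl
          (fun d ch =>
            if 'a' ≤ ch ∧ ch ≤ 'z' then
              let code : Int := (ch.toNat : Int) - i
              let code := if code < ('a'.toNat : Int) then code + 26 else code
              d ++ [Char.ofNat code.toNat]
            else d ++ [ch])
          []
      results ++ [String.mk decoded])
    []

-- ===== PORT B =====
-- back1(s): ''.join('z' if c == 'a' else chr(ord(c)-1) if 'a' <= c <= 'z' else c for c in s)
def pvBack1 (l : List Char) : List Char :=
  l.map (fun c =>
    if c = 'a' then 'z'
    else if 'a' ≤ c ∧ c ≤ 'z' then Char.ofNat (c.toNat - 1)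
    else c)

def caesar_cipher_decode_alt (target_text : String) : List String :=
  ((PySem.List.pyRange 0 25 1).foldl
    (fun (st : List String × List Char) _ =>
      let cur := pvBack1 st.2
      (st.1 ++ [String.mk cur], cur))
    ([target_text], target_text.toList)).1

-- ===== PRECONDITION & SPEC =====
-- A raises ValueError on the empty string (B does too); Pre_ excludes it.
def Pre_caesar_cipher_decode (target_text : String) : Prop := target_text ≠ ""
instance (target_text : String) : Decidable (Pre_caesar_cipher_decode target_text) := by unfold Pre_caesar_cipher_decode; infer_instance
def pvWitness_caesar_cipher_decode : String := "abc"
def Spec_caesar_cipher_decode (target_text : String) (out : List String) : Prop := out = caesar_cipher_decode_alt target_text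
instance (target_text : String) (out : List String) : Decidable (Spec_caesar_cipher_decode target_text out) := by unfold Spec_caesar_cipher_decode; infer_instance

-- ===== CLAIM (what is proved, stated in full; the proofs are below) =====
def Claim_equal_caesar_cipher_decode : Prop := ∀ (target_text : String), Dom_caesar_cipher_decode target_text → Pre_caesar_cipher_decode target_text → Spec_caesar_cipher_decode target_text (caesar_cipher_decode target_text)

-- ===== LEMMAS AND PROOFS =====
-- A's inner-loop body as a per-character function (proof helper)
def pvDecChar (i : Int) (ch : Char) : Char :=
  if 'a' ≤ ch ∧ ch ≤ 'z' then
    let code : Int := (ch.toNat : Int) - i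
    let code := if code < ('a'.toNat : Int) then code + 26 else code
    Char.ofNat code.toNat
  else ch

-- B's per-character one-step decoder
def pvB1Char (c : Char) : Char :=
  if c = 'a' then 'z'
  else if 'a' ≤ c ∧ c ≤ 'z' then Char.ofNat (c.toNat - 1)
  else c

-- shift 0 is the identity on every 7-bit character
set_option maxRecDepth 20000 in
theorem pv_dec0 : ∀ n : Fin 128, pvDecChar 0 (Char.ofNat (n : Nat)) = Char.ofNat (n : Nat) := by
  decide

theorem pv_dec0' (c : Char) (hc : pvDomChar c = true) : pvDecChar 0 c = c := by
  have hn : c.toNat < 128 := by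
    simp [pvDomChar] at hc
    omega
  have := pv_dec0 ⟨c.toNat, hn⟩
  simpa [Char.ofNat_toNat] using this

-- stepping back once from the shift-i decoding gives the shift-(i+1) decoding (7-bit chars, shifts 0..24)
set_option maxRecDepth 20000 in
theorem pv_step_char : ∀ (i : Fin 25) (n : Fin 128),
    pvB1Char (pvDecChar ((i : Nat) : Int) (Char.ofNat (n : Nat)))
      = pvDecChar (((i : Nat) : Int) + 1) (Char.ofNat (n : Nat)) := by
  decide

theorem pv_step_char' (i : Int) (hi0 : 0 ≤ i) (hi : i < 25) (c : Char) (hc : pvDomChar c = true) :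
    pvB1Char (pvDecChar i c) = pvDecChar (i + 1) c := by
  have hn : c.toNat < 128 := by
    simp [pvDomChar] at hc
    omega
  have hcast : ((⟨i.toNat, by omega⟩ : Fin 25) : Nat) = i.toNat := rfl
  have := pv_step_char ⟨i.toNat, by omega⟩ ⟨c.toNat, hn⟩
  simpa [hcast, Int.toNat_of_nonneg hi0, Char.ofNat_toNat] using this

theorem pv_back1_dec (l : List Char) (hl : l.all pvDomChar = true)
    (i : Int) (hi0 : 0 ≤ i) (hi : i < 25) :
    pvBack1 (l.map (pvDecChar i)) = l.map (pvDecChar (i + 1)) := by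
  unfold pvBack1
  rw [List.map_map]
  apply List.map_congr_left
  intro c hc
  exact pv_step_char' i hi0 hi c (by simpa using List.all_eq_true.mp hl c hc)

theorem pv_foldl_append {α β : Type} (g : α → β) (l : List α) :
    ∀ acc : List β, l.foldl (fun d x => d ++ [g x]) acc = acc ++ l.map g := by
  induction l with
  | nil => simp
  | cons h t ih => intro acc; simp [List.foldl, ih]

theorem pv_inner_eq (i : Int) (l : List Char) (acc : List Char) :
    l.foldl
      (fun d ch =>
        if 'a' ≤ ch ∧ ch ≤ 'z' then
          let code : Int := (ch.toNat : Int) - i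
          let code := if code < ('a'.toNat : Int) then code + 26 else code
          d ++ [Char.ofNat code.toNat]
        else d ++ [ch]) acc
      = acc ++ l.map (pvDecChar i) := by
  induction l generalizing acc with
  | nil => simp
  | cons h t ih =>
    simp only [List.foldl]
    rw [ih]
    by_cases hP : 'a' ≤ h ∧ h ≤ 'z' <;> simp [pvDecChar, hP]

-- invariant of B's chaining loop
theorem pv_chain (l : List Char) (hl : l.all pvDomChar = true) :
    ∀ k : Nat, k ≤ 25 →
      (PySem.List.pyRange 0 (k : Int) 1).foldl
        (fun (st : List String × List Char) _ =>
          let cur := pvBack1 st.2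
          (st.1 ++ [String.mk cur], cur))
        ([String.mk l], l)
      = ((PySem.List.pyRange 0 ((k : Int) + 1) 1).map
           (fun i => String.mk (l.map (pvDecChar i))),
         l.map (pvDecChar (k : Int))) := by
  intro k hk
  induction k with
  | zero =>
    have h0 : l.map (pvDecChar 0) = l := by
      have := List.map_congr_left
        (fun c hc => pv_dec0' c (by simpa using List.all_eq_true.mp hl c hc))
      simpa using this
    rw [Nat.cast_zero, PySem.List.pyRange_one_eq_nil (by omega : (0:Int) ≤ 0),
      PySem.List.pyRange_one_singleton]
    simp [h0]
  | succ k ih =>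
    have hk' : k ≤ 25 := by omega
    have hstep := ih hk'
    rw [show ((k + 1 : Nat) : Int) = (k : Int) + 1 by push_cast; ring,
        PySem.List.pyRange_one_succ_right (by positivity : (0:Int) ≤ (k:Int)),
        List.foldl_append, hstep]
    have hb : pvBack1 (l.map (pvDecChar (k : Int))) = l.map (pvDecChar ((k : Int) + 1)) := by
      apply pv_back1_dec l hl _ (by positivity)
      omega
    simp only [List.foldl, hb]
    rw [PySem.List.pyRange_one_succ_right (by positivity : (0:Int) ≤ (k:Int) + 1),
        List.map_append]
    simp

-- ===== VERDICT (by name: the statement is the Claim_ definition above) =====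
set_option maxHeartbeats 1000000 in
theorem caesar_cipher_decode_spec : Claim_equal_caesar_cipher_decode := by
  intro s hdom _
  unfold Spec_caesar_cipher_decode caesar_cipher_decode caesar_cipher_decode_alt
  have hfun : (fun (results : List String) (i : Int) =>
        let decoded := s.toList.foldl
          (fun d ch =>
            if 'a' ≤ ch ∧ ch ≤ 'z' then
              let code : Int := (ch.toNat : Int) - i
              let code := if code < ('a'.toNat : Int) then code + 26 else code
              d ++ [Char.ofNat code.toNat]
            else d ++ [ch]) []
        results ++ [String.mk decoded])
      = (fun (results : List String) (i : Int) =>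
          results ++ [String.mk (s.toList.map (pvDecChar i))]) := by
    funext results i
    simp only [pv_inner_eq, List.nil_append]
  rw [hfun, pv_foldl_append (fun i => String.mk (s.toList.map (pvDecChar i)))
        (PySem.List.pyRange 0 26 1) [], List.nil_append]
  have hchain := pv_chain s.toList hdom 25 (by omega)
  have hs : String.mk s.toList = s := String.ofList_toList
  rw [show ((25:Nat) : Int) = (25:Int) by norm_num] at hchain
  rw [hs] at hchain
  rw [hchain]
  norm_num
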